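-- pv_equiv track=rewrite | github.com/meronic/autoplay | core.py | clean_youtube_title
-- ===== SOURCE A (Python) =====
-- def clean_youtube_title(raw: str) -> str:
--     """윈도우 제목에서 유튜브 곡 이름만 추출"""
--     if not raw:
--         return ""
--     for sep in [
--         " - YouTube Music",
--         " - YouTube",
--         " - Google Chrome",
--         " - Microsoft Edge",
--         " - Brave",
--     ]:
--         if sep in raw:
--             raw = raw.split(sep)[0]
--     return raw.strip()
-- ===== SOURCE B (Python) =====
-- SEPS = [
--     " - YouTube Music",
--     " - YouTube",
--     " - Google Chrome",
--     " - Microsoft Edge",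
--     " - Brave",
-- ]
--
--
-- def clean_youtube_title(raw: str) -> str:
--     """윈도우 제목에서 유튜브 곡 이름만 추출"""
--     positions = [p for p in (raw.find(sep) for sep in SEPS) if p != -1]
--     cut = min(positions, default=len(raw))
--     return raw[:cut].strip()
-- ===== Notes on version B (the rewrite author's own statement) =====
-- stated objective: simpler
-- what changed: Instead of iteratively truncating the string once per separator (five sequential split-and-reassign passes plus an empty-string guard), B computes each separator's first-occurrence index on the original string, takes the minimum (defaulting to len(raw)), and slices once before stripping; the empty guard disappears because the default cut handles it.
import Mathlib
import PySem

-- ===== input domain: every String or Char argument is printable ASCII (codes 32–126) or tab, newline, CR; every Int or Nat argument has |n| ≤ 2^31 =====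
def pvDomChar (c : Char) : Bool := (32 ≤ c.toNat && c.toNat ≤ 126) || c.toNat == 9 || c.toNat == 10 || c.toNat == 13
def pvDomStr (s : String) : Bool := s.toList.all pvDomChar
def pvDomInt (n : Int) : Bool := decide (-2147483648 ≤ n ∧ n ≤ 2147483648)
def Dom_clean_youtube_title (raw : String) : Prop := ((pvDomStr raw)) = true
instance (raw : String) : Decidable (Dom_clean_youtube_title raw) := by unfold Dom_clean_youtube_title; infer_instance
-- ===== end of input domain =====

-- B replaces A's five sequential truncations (raw = raw.split(sep)[0] per separator) by one cut:
-- the minimum first-occurrence index over the separators, sliced once and stripped (objective: simpler).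

-- ===== PORT A =====
-- A's literal separator list
def pvSepsA : List (List Char) :=
  [" - YouTube Music".toList, " - YouTube".toList, " - Google Chrome".toList,
   " - Microsoft Edge".toList, " - Brave".toList]

-- literal port of A: the empty guard, then one split-and-keep-head per separator, then strip.
-- raw.split(sep)[0] is ported as (splitOn …).headI: sep is a nonempty literal (so split(sep) is
-- Chars.splitOn, no ValueError) and a split result is never [], so [0] cannot raise.
def clean_youtube_title (raw : String) : String :=
  if raw.toList = [] then ""
  else
    String.ofList (PySem.Chars.strip
      (pvSepsA.foldl
        (fun r sep => if PySem.Chars.isIn sep r then (PySem.Chars.splitOn r sep).headI else r)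
        raw.toList))

-- ===== PORT B =====
def pvSepsB : List (List Char) :=
  [" - YouTube Music".toList, " - YouTube".toList, " - Google Chrome".toList,
   " - Microsoft Edge".toList, " - Brave".toList]

-- literal port of B (Source B): collect the find() positions that are not -1, cut at their minimum
-- (default len(raw)), strip the slice.
def clean_youtube_title_alt (raw : String) : String :=
  let l := raw.toList
  let positions := (pvSepsB.map (fun sep => PySem.Chars.find l sep)).filter (fun p => !(p == -1))
  let cut : Int := PySem.List.minD positions (fun x => x) (l.length : Int)
  String.ofList (PySem.Chars.strip (PySem.List.slice l none (some cut)))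

-- ===== PRECONDITION & SPEC =====
def Spec_clean_youtube_title (raw : String) (out : String) : Prop := out = clean_youtube_title_alt raw
instance (raw : String) (out : String) : Decidable (Spec_clean_youtube_title raw out) := by unfold Spec_clean_youtube_title; infer_instance

-- ===== CLAIM (what is proved, stated in full; the proofs are below) =====
def Claim_equal_clean_youtube_title : Prop := ∀ (raw : String), Dom_clean_youtube_title raw → Spec_clean_youtube_title raw (clean_youtube_title raw)

-- ===== LEMMAS AND PROOFS =====

-- the part of l before the first occurrence of sep (all of l if sep does not occur)
def pvF (l sep : List Char) : List Char :=
  if 0 ≤ PySem.Chars.find l sep then l.take (PySem.Chars.find l sep).toNat else l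

-- no nonempty proper suffix of s is prefix-comparable with s' (rules out straddling occurrences)
def pvNoOv (s s' : List Char) : Bool :=
  (List.range s.length).all
    (fun j => decide (j = 0) || !((s.drop j).isPrefixOf s' || s'.isPrefixOf (s.drop j)))

theorem pv_infix_iff_drop (sub m : List Char) : sub <:+: m ↔ ∃ j, sub <+: m.drop j := by
  rw [← PySem.Chars.isIn_iff_infix, ← PySem.Chars.exists_prefix_drop_iff_isIn]

theorem pv_find_eq_of {m sub : List Char} {i : Nat} (h1 : sub <+: m.drop i)
    (h2 : ∀ i' < i, ¬ sub <+: m.drop i') : PySem.Chars.find m sub = i := by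
  have hnn : 0 ≤ PySem.Chars.find m sub := by
    rw [PySem.Chars.find_nonneg_iff, pv_infix_iff_drop]; exact ⟨i, h1⟩
  obtain ⟨hocc, hmin⟩ := PySem.Chars.find_spec hnn
  rcases Nat.lt_trichotomy (PySem.Chars.find m sub).toNat i with h | h | h
  · exact absurd hocc (h2 _ h)
  · omega
  · exact absurd h1 (hmin _ h)

theorem pv_find_neg {m sub : List Char} (h : ∀ j, ¬ sub <+: m.drop j) :
    PySem.Chars.find m sub = -1 := by
  rw [PySem.Chars.find_eq_neg_one_iff, pv_infix_iff_drop]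
  rintro ⟨j, hj⟩; exact h j hj

theorem pvF_cons {sep rest : List Char} {c : Char} (h : ¬ sep <+: (c :: rest)) :
    pvF (c :: rest) sep = c :: pvF rest sep := by
  by_cases hin : ∃ j, sep <+: rest.drop j
  · have hnn : 0 ≤ PySem.Chars.find rest sep := by
      rw [PySem.Chars.find_nonneg_iff, pv_infix_iff_drop]; exact hin
    obtain ⟨hocc, hmin⟩ := PySem.Chars.find_spec hnn
    set q := (PySem.Chars.find rest sep).toNat with hq
    have hfind : PySem.Chars.find (c :: rest) sep = (q + 1 : Nat) := by
      apply pv_find_eq_of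
      · simpa using hocc
      · intro i' hi'
        match i' with
        | 0 => simpa using h
        | (j+1) => simpa using hmin j (by omega)
    simp only [pvF, hfind]
    have : 0 ≤ PySem.Chars.find rest sep := hnn
    rw [if_pos (by positivity), if_pos hnn]
    simp [← hq]
  · have h1 : PySem.Chars.find rest sep = -1 := pv_find_neg (by push Not at hin; exact hin)
    have h2 : PySem.Chars.find (c :: rest) sep = -1 := by
      apply pv_find_neg
      intro j
      match j with
      | 0 => simpa using h
      | (j+1) => push Not at hin; simpa using hin j
    simp [pvF, h1, h2]

theorem pv_splitOn_go_head (sep : List Char) (hsep : sep ≠ []) :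
    ∀ (fuel : Nat) (l cur : List Char) (acc : List (List Char)), l.length < fuel →
    ∃ R, PySem.Chars.splitOn.go sep fuel l cur acc
        = acc.reverse ++ (cur.reverse ++ pvF l sep) :: R := by
  intro fuel
  induction fuel with
  | zero => intro l cur acc h; omega
  | succ fuel ih =>
    intro l cur acc h
    match l with
    | [] =>
      refine ⟨[], ?_⟩
      have : pvF [] sep = [] := by
        simp [pvF, pv_find_neg (m := []) (sub := sep) (by intro j; simpa using hsep)]
      simp [PySem.Chars.splitOn.go, this]
    | c :: rest =>
      by_cases hp : sep.isPrefixOf (c :: rest)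
      · have hpre : sep <+: (c :: rest) := List.isPrefixOf_iff_prefix.mp hp
        have hdroplen : (List.drop sep.length (c :: rest)).length < fuel := by
          have h1 : 0 < sep.length := List.length_pos_of_ne_nil hsep
          simp only [List.length_drop, List.length_cons] at h ⊢
          omega
        obtain ⟨R, hR⟩ := ih (List.drop sep.length (c :: rest)) [] (cur.reverse :: acc) hdroplen
        have hF : pvF (c :: rest) sep = [] := by
          have : PySem.Chars.find (c :: rest) sep = (0 : Nat) := by
            apply pv_find_eq_of (by simpa using hpre) (by omega)
          simp [pvF, this]
        refine ⟨pvF (List.drop sep.length (c :: rest)) sep :: R, ?_⟩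
        simp only [PySem.Chars.splitOn.go, if_pos hp]
        rw [hR]
        simp [hF]
      · have hnpre : ¬ sep <+: (c :: rest) := fun hh => hp (List.isPrefixOf_iff_prefix.mpr hh)
        have hlen : rest.length < fuel := by simp at h; omega
        obtain ⟨R, hR⟩ := ih rest (c :: cur) acc hlen
        refine ⟨R, ?_⟩
        simp only [PySem.Chars.splitOn.go, if_neg hp]
        rw [hR, pvF_cons hnpre]
        simp

theorem pv_splitOn_headI {l sep : List Char} (hsep : sep ≠ []) :
    (PySem.Chars.splitOn l sep).headI = pvF l sep := by
  obtain ⟨R, hR⟩ := pv_splitOn_go_head sep hsep (l.length + 1) l [] [] (by omega)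
  simp [PySem.Chars.splitOn, hR]

theorem pv_occ_take {sub l : List Char} {k i : Nat} (hs : sub ≠ []) :
    sub <+: (l.take k).drop i ↔ (sub <+: l.drop i ∧ i + sub.length ≤ k) := by
  have hlen : 0 < sub.length := List.length_pos_of_ne_nil hs
  rw [List.drop_take, List.prefix_take_iff]
  constructor
  · rintro ⟨h1, h2⟩; exact ⟨h1, by omega⟩
  · rintro ⟨h1, h2⟩; exact ⟨h1, by omega⟩

theorem pv_stepA_eq {r sep : List Char} (hsep : sep ≠ []) :
    (if PySem.Chars.isIn sep r then (PySem.Chars.splitOn r sep).headI else r) = pvF r sep := by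
  by_cases h : PySem.Chars.isIn sep r = true
  · rw [if_pos h, pv_splitOn_headI hsep]
  · rw [if_neg (by simp [h])]
    have hfind : PySem.Chars.find r sep = -1 := by
      rw [PySem.Chars.find_eq_neg_one_iff, ← PySem.Chars.isIn_iff_infix]
      simp [h]
    simp [pvF, hfind]

theorem pv_foldl_stepA (S : List (List Char)) (hne : ∀ s ∈ S, s ≠ []) (r : List Char) :
    S.foldl (fun r sep => if PySem.Chars.isIn sep r then (PySem.Chars.splitOn r sep).headI else r) r
      = S.foldl pvF r := by
  induction S generalizing r with
  | nil => rfl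
  | cons s t ih =>
    simp only [List.foldl_cons]
    rw [pv_stepA_eq (hne s (List.mem_cons_self))]
    exact ih (fun x hx => hne x (List.mem_cons_of_mem _ hx)) _

-- the single-cut accumulator: min of the found positions, folded one separator at a time
def pvMinStep (l : List Char) (k : Nat) (s : List Char) : Nat :=
  if 0 ≤ PySem.Chars.find l s ∧ (PySem.Chars.find l s).toNat < k
  then (PySem.Chars.find l s).toNat else k

theorem pv_main_fold :
    ∀ (S : List (List Char)) (l : List Char) (k : Nat),
    (∀ s ∈ S, s ≠ []) →
    (∀ s ∈ S, ∀ s' ∈ S, pvNoOv s s' = true) →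
    k ≤ l.length →
    (k = l.length ∨ ∃ s', s' <+: l.drop k ∧ ∀ s ∈ S, pvNoOv s s' = true) →
    S.foldl pvF (l.take k) = l.take (S.foldl (pvMinStep l) k) := by
  intro S
  induction S with
  | nil => intro l k _ _ _ _; rfl
  | cons s t ih =>
    intro l k hne hpair hk hinv
    have hs : s ≠ [] := hne s List.mem_cons_self
    have hslen : 0 < s.length := List.length_pos_of_ne_nil hs
    have hne' : ∀ x ∈ t, x ≠ [] := fun x hx => hne x (List.mem_cons_of_mem _ hx)
    have hpair' : ∀ x ∈ t, ∀ y ∈ t, pvNoOv x y = true :=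
      fun x hx y hy => hpair x (List.mem_cons_of_mem _ hx) y (List.mem_cons_of_mem _ hy)
    simp only [List.foldl_cons]
    by_cases hpn : 0 ≤ PySem.Chars.find l s
    · obtain ⟨hocc, hmin⟩ := PySem.Chars.find_spec hpn
      set pN := (PySem.Chars.find l s).toNat with hpN
      have hple : pN + s.length ≤ l.length := by
        have h1 := List.IsPrefix.length_le hocc
        simp only [List.length_drop] at h1
        have h2 : (PySem.Chars.find l s) ≤ (l.length : Int) := PySem.Chars.find_le_length l s
        omega
      by_cases hlt : pN < k
      · -- the cut moves to pN; first show the occurrence fits inside the current prefix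
        have hfit : pN + s.length ≤ k := by
          rcases hinv with hkl | ⟨s', hw, hno⟩
          · omega
          · by_contra hbig
            have hj0 : 0 < k - pN := by omega
            have hjs : k - pN < s.length := by omega
            obtain ⟨r, hr⟩ := hocc
            have hdropk : List.drop k l = List.drop (k - pN) s ++ r := by
              have h1 : List.drop k l = List.drop (k - pN) (List.drop pN l) := by
                rw [List.drop_drop]; congr 1; omega
              rw [h1, ← hr, List.drop_append_of_le_length (by omega)]
            have hdroppre : List.drop (k - pN) s <+: List.drop k l := ⟨r, hdropk.symm⟩
            have hcomp := List.prefix_or_prefix_of_prefix hdroppre hw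
            have hnoOv := hno s List.mem_cons_self
            unfold pvNoOv at hnoOv
            rw [List.all_eq_true] at hnoOv
            have hx := hnoOv (k - pN) (List.mem_range.mpr (by omega))
            simp only [Bool.or_eq_true, Bool.not_eq_true', Bool.or_eq_false_iff,
              decide_eq_true_eq] at hx
            rcases hx with hx | ⟨hx1, hx2⟩
            · omega
            · rcases hcomp with hc | hc
              · exact absurd (List.isPrefixOf_iff_prefix.mpr hc) (by simp [hx1])
              · exact absurd (List.isPrefixOf_iff_prefix.mpr hc) (by simp [hx2])
        have hfind_take : PySem.Chars.find (l.take k) s = (pN : Nat) := by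
          apply pv_find_eq_of
          · exact (pv_occ_take hs).mpr ⟨hocc, hfit⟩
          · intro i' hi' hcon
            rw [pv_occ_take hs] at hcon
            exact hmin i' hi' hcon.1
        have hstep : pvF (l.take k) s = l.take pN := by
          simp only [pvF, hfind_take]
          rw [if_pos (by omega)]
          rw [List.take_take]
          congr 1
          simp
          omega
        have hmstep : pvMinStep l k s = pN := by
          simp only [pvMinStep]
          rw [if_pos ⟨hpn, hlt⟩]
        rw [hstep, hmstep]
        exact ih l pN hne' hpair' (by omega)
          (Or.inr ⟨s, hocc, fun x hx => hpair x (List.mem_cons_of_mem _ hx) s List.mem_cons_self⟩)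
      · -- first occurrence is at or after the cut: nothing changes
        have hfind_take : PySem.Chars.find (l.take k) s = -1 := by
          apply pv_find_neg
          intro j hj
          rw [pv_occ_take hs] at hj
          exact hmin j (by omega) hj.1
        have hstep : pvF (l.take k) s = l.take k := by
          simp [pvF, hfind_take]
        have hmstep : pvMinStep l k s = k := by
          simp only [pvMinStep]
          rw [if_neg (by omega)]
        rw [hstep, hmstep]
        rcases hinv with hkl | ⟨s', hw, hno⟩
        · exact ih l k hne' hpair' hk (Or.inl hkl)
        · exact ih l k hne' hpair' hk
            (Or.inr ⟨s', hw, fun x hx => hno x (List.mem_cons_of_mem _ hx)⟩)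
    · -- the separator does not occur in l at all
      have hneg : PySem.Chars.find l s = -1 := by
        have := PySem.Chars.neg_one_le_find l s; omega
      have hnin : ∀ j, ¬ s <+: List.drop j l := by
        rw [PySem.Chars.find_eq_neg_one_iff, pv_infix_iff_drop] at hneg
        push Not at hneg
        exact hneg
      have hfind_take : PySem.Chars.find (l.take k) s = -1 := by
        apply pv_find_neg
        intro j hj
        rw [pv_occ_take hs] at hj
        exact hnin j hj.1
      have hstep : pvF (l.take k) s = l.take k := by
        simp [pvF, hfind_take]
      have hmstep : pvMinStep l k s = k := by
        simp only [pvMinStep]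
        rw [if_neg (by omega)]
      rw [hstep, hmstep]
      rcases hinv with hkl | ⟨s', hw, hno⟩
      · exact ih l k hne' hpair' hk (Or.inl hkl)
      · exact ih l k hne' hpair' hk
          (Or.inr ⟨s', hw, fun x hx => hno x (List.mem_cons_of_mem _ hx)⟩)

theorem pv_foldl_skip (ps : List Int) :
    ∀ a : Int, (∀ p ∈ ps, -1 ≤ p) →
    ps.foldl (fun acc p => if 0 ≤ p then min acc p else acc) a
      = (ps.filter (fun p => !(p == -1))).foldl min a := by
  induction ps with
  | nil => intro a _; rfl
  | cons p t ih =>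
    intro a hb
    have hp := hb p List.mem_cons_self
    have hb' : ∀ q ∈ t, -1 ≤ q := fun q hq => hb q (List.mem_cons_of_mem _ hq)
    by_cases h : p = -1
    · subst h
      simp only [List.foldl_cons, List.filter_cons]
      rw [if_neg (by omega), if_neg (by simp)]
      exact ih a hb'
    · simp only [List.foldl_cons, List.filter_cons]
      rw [if_pos (by omega), if_pos (by simp [h]), List.foldl_cons]
      exact ih (min a p) hb'

theorem pv_minD_foldl (qs : List Int) (n : Int) (hq : ∀ q ∈ qs, q ≤ n) :
    PySem.List.minD qs (fun x => x) n = qs.foldl min n := by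
  cases qs with
  | nil =>
    rw [PySem.List.minD, (PySem.List.min?_eq_none_iff _ _).mpr rfl]
    rfl
  | cons q t =>
    rw [PySem.List.minD, PySem.List.min?_id_cons, Option.getD_some, List.foldl_cons]
    congr 1
    exact (min_eq_right (hq q List.mem_cons_self)).symm

theorem pv_cast_fold (ps : List Int) :
    ∀ (k : Nat),
    ((ps.foldl (fun k p => if 0 ≤ p ∧ p.toNat < k then p.toNat else k) k : Nat) : Int)
      = ps.foldl (fun acc p => if 0 ≤ p then min acc p else acc) (k : Int) := by
  induction ps with
  | nil => intro k; rfl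
  | cons p t ih =>
    intro k
    simp only [List.foldl_cons]
    rw [ih]
    congr 1
    split_ifs <;> omega

theorem pv_cut_eq (l : List Char) :
    PySem.List.minD
      ((pvSepsB.map (fun sep => PySem.Chars.find l sep)).filter (fun p => !(p == -1)))
      (fun x => x) (l.length : Int)
    = ((pvSepsA.foldl (pvMinStep l) l.length : Nat) : Int) := by
  have hball : ∀ p ∈ pvSepsB.map (fun sep => PySem.Chars.find l sep),
      -1 ≤ p ∧ p ≤ (l.length : Int) := by
    intro p hp
    obtain ⟨s, _, rfl⟩ := List.mem_map.mp hp
    exact ⟨PySem.Chars.neg_one_le_find l s, PySem.Chars.find_le_length l s⟩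
  rw [pv_minD_foldl _ _ (fun q hq => (hball q (List.mem_filter.mp hq).1).2)]
  rw [← pv_foldl_skip _ _ (fun p hp => (hball p hp).1)]
  rw [← pv_cast_fold]
  congr 1

theorem pv_noov_all : ∀ s ∈ pvSepsA, ∀ s' ∈ pvSepsA, pvNoOv s s' = true := by
  decide

theorem pv_ne_all : ∀ s ∈ pvSepsA, s ≠ [] := by decide

-- ===== VERDICT (by name: the statement is the Claim_ definition above) =====
theorem clean_youtube_title_spec : Claim_equal_clean_youtube_title := by
  intro raw _
  unfold Spec_clean_youtube_title
  by_cases h : raw.toList = []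
  · simp only [clean_youtube_title, clean_youtube_title_alt, h]
    decide
  · simp only [clean_youtube_title, clean_youtube_title_alt, if_neg h]
    have hA : pvSepsA.foldl
        (fun r sep => if PySem.Chars.isIn sep r then (PySem.Chars.splitOn r sep).headI else r)
        raw.toList
        = raw.toList.take (pvSepsA.foldl (pvMinStep raw.toList) raw.toList.length) := by
      rw [pv_foldl_stepA pvSepsA pv_ne_all]
      calc pvSepsA.foldl pvF raw.toList
          = pvSepsA.foldl pvF (raw.toList.take raw.toList.length) := by rw [List.take_length]
        _ = raw.toList.take (pvSepsA.foldl (pvMinStep raw.toList) raw.toList.length) :=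
            pv_main_fold pvSepsA raw.toList raw.toList.length pv_ne_all pv_noov_all
              (le_refl _) (Or.inl rfl)
    have hB : PySem.List.slice raw.toList none
        (some (PySem.List.minD
          ((pvSepsB.map (fun sep => PySem.Chars.find raw.toList sep)).filter (fun p => !(p == -1)))
          (fun x => x) (raw.toList.length : Int)))
        = raw.toList.take (pvSepsA.foldl (pvMinStep raw.toList) raw.toList.length) := by
      rw [pv_cut_eq raw.toList, PySem.List.slice_to _ (Int.natCast_nonneg _), Int.toNat_natCast]
    rw [hA, hB]
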